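-- pv_equiv track=rewrite | github.com/octave-commons/fork_tales | part64/code/world_web/catalog.py | _normalize_archive_member_path
-- ===== SOURCE A (Python) =====
-- def _normalize_archive_member_path(member_path: str) -> str | None:
--     raw = str(member_path or "").strip().replace("\\", "/")
--     if not raw:
--         return None
--     parts: list[str] = []
--     for part in raw.split("/"):
--         token = part.strip()
--         if not token or token == ".":
--             continue
--         if token == "..":
--             return None
--         parts.append(token)
--     return "/".join(parts) if parts else None
-- ===== SOURCE B (Python) =====
-- def _normalize_archive_member_path(member_path: str) -> str | None:
--     # Single character-level scan: '/' and '\\' are separators; each collected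
--     # token is stripped; '..' rejects; empty and '.' tokens are dropped.
--     # A trailing sentinel separator flushes the last token.
--     text = str(member_path or "")
--     parts: list[str] = []
--     tok = ""
--     for ch in text + "/":
--         if ch == "/" or ch == "\\":
--             t = tok.strip()
--             tok = ""
--             if t == "..":
--                 return None
--             if t and t != ".":
--                 parts.append(t)
--         else:
--             tok += ch
--     return "/".join(parts) if parts else None
-- ===== Notes on version B (the rewrite author's own statement) =====
-- stated objective: alternative
-- what changed: Replaces A's strip/replace/split string-pipeline plus token loop by a single character-level state machine that scans the string once, cutting tokens at either separator character with a sentinel separator flushing the last token; whole-string stripping and the empty-string guard become unnecessary because per-token stripping and the empty-parts check subsume them.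
import Mathlib
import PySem

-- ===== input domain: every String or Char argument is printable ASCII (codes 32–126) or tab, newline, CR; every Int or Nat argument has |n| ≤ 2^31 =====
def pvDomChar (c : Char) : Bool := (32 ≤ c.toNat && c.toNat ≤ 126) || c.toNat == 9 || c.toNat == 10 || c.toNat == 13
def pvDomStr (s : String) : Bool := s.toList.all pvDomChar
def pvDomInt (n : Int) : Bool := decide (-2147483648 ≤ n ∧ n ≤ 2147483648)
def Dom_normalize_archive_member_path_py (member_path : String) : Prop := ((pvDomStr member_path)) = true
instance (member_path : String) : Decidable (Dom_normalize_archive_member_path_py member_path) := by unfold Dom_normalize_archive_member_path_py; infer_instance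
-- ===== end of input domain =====

-- B replaces A's strip/replace/split pipeline by a single character-level state machine (same return value; objective: alternative).


-- ===== PORT A =====
-- str.split(sep) for a NONEMPTY sep (here "/"): exact, via PySem.Chars.splitOn.
def pvSplit (s sep : String) : List String :=
  (PySem.Chars.splitOn s.toList sep.toList).map String.ofList

-- A's for-loop with early 'return None' on '..'; none = that early return.
def pvALoop : List String → List String → Option (List String)
  | [], parts => some parts
  | part :: rest, parts =>
    let token := PySem.Str.strip part
    if token = "" ∨ token = "." then pvALoop rest parts
    else if token = ".." then none
    else pvALoop rest (parts ++ [token])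

def normalize_archive_member_path_py (member_path : String) : Option String :=
  -- str(member_path or "") is member_path itself for a string argument
  let raw := PySem.Str.replace (PySem.Str.strip member_path) "\\" "/"
  if raw = "" then none
  else
    match pvALoop (pvSplit raw "/") [] with
    | none => none
    | some parts => if parts = [] then none else some (PySem.Str.join "/" parts)

-- ===== PORT B =====
-- B's character loop over text + "/": tok accumulates the current token; a
-- separator ('/' or '\\') flushes it; none = B's early 'return None' on '..'.
def pvBLoop : List Char → List String → List Char → Option (List String)
  | [], parts, _tok => some parts
  | c :: cs, parts, tok =>
    if c = '/' ∨ c = '\\' then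
      let t := PySem.Str.strip (String.ofList tok)
      if t = ".." then none
      else if t ≠ "" ∧ t ≠ "." then pvBLoop cs (parts ++ [t]) []
      else pvBLoop cs parts []
    else pvBLoop cs parts (tok ++ [c])

def normalize_archive_member_path_py_alt (member_path : String) : Option String :=
  match pvBLoop (member_path.toList ++ ['/']) [] [] with
  | none => none
  | some parts => if parts = [] then none else some (PySem.Str.join "/" parts)

-- ===== PRECONDITION & SPEC =====
def Spec_normalize_archive_member_path_py (member_path : String) (out : Option String) : Prop := out = normalize_archive_member_path_py_alt member_path
instance (member_path : String) (out : Option String) : Decidable (Spec_normalize_archive_member_path_py member_path out) := by unfold Spec_normalize_archive_member_path_py; infer_instance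

-- ===== CLAIM (what is proved, stated in full; the proofs are below) =====
def Claim_equal_normalize_archive_member_path_py : Prop := ∀ (member_path : String), Dom_normalize_archive_member_path_py member_path → Spec_normalize_archive_member_path_py member_path (normalize_archive_member_path_py member_path)

-- ===== LEMMAS AND PROOFS =====

-- '\\' → '/' substitution, one character (proof-side view of A's .replace)
def pvSubst (c : Char) : Char := if c = '\\' then '/' else c

-- proof-side view of splitting on BOTH separators, with a partial token carried
def pvSplitSeps : List Char → List Char → List (List Char)
  | [], tok => [tok]
  | c :: cs, tok => if c = '/' ∨ c = '\\' then tok :: pvSplitSeps cs [] else pvSplitSeps cs (tok ++ [c])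

theorem pvALoop_eq (l : List String) : ∀ parts : List String,
    pvALoop l parts =
      if (l.map PySem.Str.strip).any (· == "..") then none
      else some (parts ++ (l.map PySem.Str.strip).filter (fun t => !(t == "") && !(t == "."))) := by
  induction l with
  | nil => intro parts; simp [pvALoop]
  | cons p rest ih =>
    intro parts
    simp only [pvALoop, List.map_cons, List.any_cons, List.filter_cons]
    by_cases h1 : PySem.Str.strip p = "" ∨ PySem.Str.strip p = "."
    · have h2 : PySem.Str.strip p ≠ ".." := by rcases h1 with h | h <;> simp [h]
      rcases h1 with h | h <;> simp [h, ih]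
    · by_cases h2 : PySem.Str.strip p = ".."
      · simp [h2]
      · push Not at h1
        simp [h1.1, h1.2, h2, ih]

theorem pvReplace_go_eq (l : List Char) : ∀ (fuel : Nat) (acc : List Char), l.length ≤ fuel →
    PySem.Chars.replace.go ['\\'] ['/'] fuel l acc = acc.reverse ++ l.map pvSubst := by
  induction l with
  | nil =>
    intro fuel acc _
    cases fuel <;> simp [PySem.Chars.replace.go]
  | cons c t ih =>
    intro fuel acc hf
    cases fuel with
    | zero => simp at hf
    | succ f =>
      by_cases hc : c = '\\'
      · simp [PySem.Chars.replace.go, hc, List.isPrefixOf, ih f ('/' :: acc) (by simpa using hf), pvSubst]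
      · simp [PySem.Chars.replace.go, List.isPrefixOf, Ne.symm hc, hc, ih f (c :: acc) (by simpa using hf), pvSubst]

theorem pvReplace_eq (l : List Char) :
    PySem.Chars.replace l ['\\'] ['/'] = l.map pvSubst := by
  simp [PySem.Chars.replace, pvReplace_go_eq l l.length [] (le_refl _)]

theorem pvSplitOn_go_eq (l : List Char) : ∀ (fuel : Nat) (cur : List Char) (acc : List (List Char)), l.length ≤ fuel →
    PySem.Chars.splitOn.go ['/'] fuel (l.map pvSubst) cur acc = acc.reverse ++ pvSplitSeps l cur.reverse := by
  induction l with
  | nil =>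
    intro fuel cur acc _
    cases fuel <;> simp [PySem.Chars.splitOn.go, pvSplitSeps]
  | cons c t ih =>
    intro fuel cur acc hf
    cases fuel with
    | zero => simp at hf
    | succ f =>
      by_cases hc : c = '/' ∨ c = '\\'
      · have hs : pvSubst c = '/' := by rcases hc with h | h <;> simp [pvSubst, h]
        simp [PySem.Chars.splitOn.go, hs, List.isPrefixOf, pvSplitSeps, hc,
          ih f [] (cur.reverse :: acc) (by simpa using hf)]
      · have hs : pvSubst c = c := by push Not at hc; simp [pvSubst, hc.2]
        have hne : ¬ ('/' = pvSubst c) := by rw [hs]; push Not at hc; exact fun h => hc.1 h.symm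
        simp [PySem.Chars.splitOn.go, List.isPrefixOf, hs, pvSplitSeps, hc,
          ih f (c :: cur) acc (by simpa using hf)]
        intro h
        exact absurd (Or.inl h.symm) hc

theorem pvSplitOn_eq (l : List Char) :
    PySem.Chars.splitOn (l.map pvSubst) ['/'] = pvSplitSeps l [] := by
  have h := pvSplitOn_go_eq l (l.length + 1) [] [] (by omega)
  simpa [PySem.Chars.splitOn] using h

theorem pvFlush (t : String) (KA KB : Option (List String)) :
    (if t = ".." then none else if t ≠ "" ∧ t ≠ "." then KA else KB)
  = (if t = "" ∨ t = "." then KB else if t = ".." then none else KA) := by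
  by_cases h0 : t = ""
  · simp [h0]
  · by_cases h1 : t = "."
    · simp [h1]
    · by_cases h2 : t = ".."
      · simp [h2]
      · simp [h0, h1, h2]

theorem pvBLoop_eq (cs : List Char) : ∀ (parts : List String) (tok : List Char),
    pvBLoop (cs ++ ['/']) parts tok = pvALoop ((pvSplitSeps cs tok).map String.ofList) parts := by
  induction cs with
  | nil =>
    intro parts tok
    simp only [List.nil_append, pvBLoop, pvSplitSeps, List.map_cons, List.map_nil, pvALoop]
    exact pvFlush _ _ _
  | cons c cs ih =>
    intro parts tok
    by_cases hc : c = '/' ∨ c = '\\'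
    · simp only [List.cons_append, pvBLoop, pvSplitSeps, hc, if_true, List.map_cons, pvALoop, ih]
      exact pvFlush _ _ _
    · simp only [List.cons_append, pvBLoop, pvSplitSeps, hc, if_false, ih]

theorem pvWs_not_sep {c : Char} (h : PySem.Chars.isspace c = true) : ¬ (c = '/' ∨ c = '\\') := by
  rintro (rfl | rfl) <;> exact absurd h (by decide)

theorem pvRstrip_ws (t ws : List Char) (h : ∀ c ∈ ws, PySem.Chars.isspace c = true) :
    PySem.Chars.rstrip (t ++ ws) = PySem.Chars.rstrip t := by
  unfold PySem.Chars.rstrip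
  rw [List.reverse_append, List.dropWhile_append]
  have : List.dropWhile PySem.Chars.isspace ws.reverse = [] := by
    rw [List.dropWhile_eq_nil_iff]; intro c hcm; exact h c (List.mem_reverse.mp hcm)
  simp [this]

theorem pvStrip_ws_left (ws t : List Char) (h : ∀ c ∈ ws, PySem.Chars.isspace c = true) :
    PySem.Chars.strip (ws ++ t) = PySem.Chars.strip t := by
  unfold PySem.Chars.strip PySem.Chars.lstrip
  rw [List.dropWhile_append]
  have : List.dropWhile PySem.Chars.isspace ws = [] := List.dropWhile_eq_nil_iff.mpr h
  simp [this]

theorem pvStrip_ws_right (t ws : List Char) (h : ∀ c ∈ ws, PySem.Chars.isspace c = true) :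
    PySem.Chars.strip (t ++ ws) = PySem.Chars.strip t := by
  unfold PySem.Chars.strip PySem.Chars.lstrip
  rw [List.dropWhile_append]
  by_cases he : (List.dropWhile PySem.Chars.isspace t).isEmpty
  · have hw : List.dropWhile PySem.Chars.isspace ws = [] := List.dropWhile_eq_nil_iff.mpr h
    simp [hw, List.isEmpty_iff.mp he]
  · rw [if_neg (by simp [he]), pvRstrip_ws _ _ h]

theorem pvSplitSeps_ws_prefix (ws : List Char) : ∀ (cs tok : List Char), (∀ c ∈ ws, PySem.Chars.isspace c = true) →
    pvSplitSeps (ws ++ cs) tok = pvSplitSeps cs (tok ++ ws) := by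
  induction ws with
  | nil => intro cs tok _; simp
  | cons w ws ih =>
    intro cs tok h
    have hw : ¬ (w = '/' ∨ w = '\\') := pvWs_not_sep (h w (by simp))
    simp only [List.cons_append, pvSplitSeps, hw, if_false]
    rw [ih cs (tok ++ [w]) (fun c hc => h c (by simp [hc]))]
    simp

theorem pvSplitSeps_strip_tok (cs : List Char) : ∀ (ws tok : List Char), (∀ c ∈ ws, PySem.Chars.isspace c = true) →
    (pvSplitSeps cs (ws ++ tok)).map PySem.Chars.strip = (pvSplitSeps cs tok).map PySem.Chars.strip := by
  induction cs with
  | nil => intro ws tok h; simp [pvSplitSeps, pvStrip_ws_left _ _ h]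
  | cons c cs ih =>
    intro ws tok h
    by_cases hc : c = '/' ∨ c = '\\'
    · simp [pvSplitSeps, hc, pvStrip_ws_left _ _ h]
    · simp only [pvSplitSeps, hc, if_false, List.append_assoc] at *
      exact ih ws (tok ++ [c]) h

theorem pvSplitSeps_strip_suffix (cs : List Char) : ∀ (ws tok : List Char), (∀ c ∈ ws, PySem.Chars.isspace c = true) →
    (pvSplitSeps (cs ++ ws) tok).map PySem.Chars.strip = (pvSplitSeps cs tok).map PySem.Chars.strip := by
  induction cs with
  | nil =>
    intro ws tok h
    rw [List.nil_append, show pvSplitSeps ws tok = pvSplitSeps (ws ++ []) tok by simp,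
      pvSplitSeps_ws_prefix ws [] tok h]
    simp [pvSplitSeps, pvStrip_ws_right _ _ h]
  | cons c cs ih =>
    intro ws tok h
    by_cases hc : c = '/' ∨ c = '\\'
    · simp only [List.cons_append, pvSplitSeps, hc, if_true, List.map_cons]
      rw [ih ws [] h]
    · simp only [List.cons_append, pvSplitSeps, hc, if_false]
      exact ih ws (tok ++ [c]) h

theorem pvSplitSeps_strip (l : List Char) :
    (pvSplitSeps (PySem.Chars.strip l) []).map PySem.Chars.strip = (pvSplitSeps l []).map PySem.Chars.strip := by
  have hl : l = l.takeWhile PySem.Chars.isspace ++ PySem.Chars.lstrip l := (List.takeWhile_append_dropWhile).symm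
  have htw : ∀ c ∈ l.takeWhile PySem.Chars.isspace, PySem.Chars.isspace c = true := fun c hc => List.mem_takeWhile_imp hc
  -- right side: drop the leading whitespace
  conv_rhs => rw [hl]
  rw [pvSplitSeps_ws_prefix _ _ _ htw, List.nil_append]
  -- hmm: pvSplitSeps (lstrip l) ([] ++ tw) vs tok; use strip_tok with tok := []
  have h1 : (pvSplitSeps (PySem.Chars.lstrip l) (l.takeWhile PySem.Chars.isspace ++ [])).map PySem.Chars.strip
      = (pvSplitSeps (PySem.Chars.lstrip l) []).map PySem.Chars.strip := pvSplitSeps_strip_tok _ _ _ htw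
  rw [show pvSplitSeps (PySem.Chars.lstrip l) (l.takeWhile PySem.Chars.isspace)
      = pvSplitSeps (PySem.Chars.lstrip l) (l.takeWhile PySem.Chars.isspace ++ []) by simp, h1]
  -- left side: strip l = rstrip (lstrip l); decompose lstrip l = strip l ++ trailing ws
  have hdecomp : PySem.Chars.lstrip l = PySem.Chars.strip l ++ ((PySem.Chars.lstrip l).reverse.takeWhile PySem.Chars.isspace).reverse := by
    unfold PySem.Chars.strip PySem.Chars.rstrip
    rw [← List.reverse_append, List.takeWhile_append_dropWhile, List.reverse_reverse]
  have hws' : ∀ c ∈ ((PySem.Chars.lstrip l).reverse.takeWhile PySem.Chars.isspace).reverse, PySem.Chars.isspace c = true := by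
    intro c hc
    exact List.mem_takeWhile_imp (List.mem_reverse.mp hc)
  conv_rhs => rw [hdecomp]
  rw [pvSplitSeps_strip_suffix _ _ _ hws']


theorem pvStrip_ofList (t : List Char) :
    PySem.Str.strip (String.ofList t) = String.ofList (PySem.Chars.strip t) := by
  simp [PySem.Str.strip, String.toList_ofList]

theorem pvOfList_eq_empty_iff (L : List Char) : String.ofList L = "" ↔ L = [] := by
  constructor
  · intro h; have := congrArg String.toList h; simpa using this
  · intro h; subst h; rfl

theorem pvStrip_eq_nil_allspace (l : List Char) (h : PySem.Chars.strip l = []) :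
    ∀ c ∈ l, PySem.Chars.isspace c = true := by
  unfold PySem.Chars.strip PySem.Chars.rstrip PySem.Chars.lstrip at h
  have h1 : List.dropWhile PySem.Chars.isspace ((List.dropWhile PySem.Chars.isspace l).reverse) = [] := by
    simpa using congrArg List.reverse h
  have h2 := List.dropWhile_eq_nil_iff.mp h1
  intro c hc
  rw [← List.takeWhile_append_dropWhile (p := PySem.Chars.isspace) (l := l)] at hc
  rcases List.mem_append.mp hc with hm | hm
  · exact List.mem_takeWhile_imp hm
  · exact h2 c (List.mem_reverse.mpr hm)

theorem pvALoop_congr (T U : List (List Char)) (h : T.map PySem.Chars.strip = U.map PySem.Chars.strip)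
    (parts : List String) :
    pvALoop (T.map String.ofList) parts = pvALoop (U.map String.ofList) parts := by
  have key : ∀ V : List (List Char),
      (V.map String.ofList).map PySem.Str.strip = (V.map PySem.Chars.strip).map String.ofList := by
    intro V
    rw [List.map_map, List.map_map]
    exact List.map_congr_left (fun t _ => pvStrip_ofList t)
  rw [pvALoop_eq, pvALoop_eq, key, key, h]

-- ===== VERDICT (by name: the statement is the Claim_ definition above) =====
theorem normalize_archive_member_path_py_spec : Claim_equal_normalize_archive_member_path_py := by
  intro s _
  unfold Spec_normalize_archive_member_path_py normalize_archive_member_path_py normalize_archive_member_path_py_alt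
  have hraw : PySem.Str.replace (PySem.Str.strip s) "\\" "/"
      = String.ofList ((PySem.Chars.strip s.toList).map pvSubst) := by
    have h1 : ("\\" : String).toList = ['\\'] := by decide
    have h2 : ("/" : String).toList = ['/'] := by decide
    simp only [PySem.Str.replace, PySem.Str.strip, String.toList_ofList, h1, h2, pvReplace_eq]
  rw [hraw, pvBLoop_eq]
  by_cases hz : PySem.Chars.strip s.toList = []
  · rw [if_pos (by rw [hz]; rfl)]
    have hall : ∀ c ∈ s.toList, PySem.Chars.isspace c = true := pvStrip_eq_nil_allspace _ hz
    have hsplit : pvSplitSeps s.toList [] = [s.toList] := by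
      have h := pvSplitSeps_ws_prefix s.toList [] [] hall
      simpa using h
    rw [hsplit]
    simp only [List.map_cons, List.map_nil, pvALoop, pvStrip_ofList, hz]
    rfl
  · rw [if_neg (by
      intro h
      exact hz (List.map_eq_nil_iff.mp ((pvOfList_eq_empty_iff _).mp h)))]
    have hA : pvSplit (String.ofList ((PySem.Chars.strip s.toList).map pvSubst)) "/"
        = (pvSplitSeps (PySem.Chars.strip s.toList) []).map String.ofList := by
      unfold pvSplit
      rw [String.toList_ofList, show ("/" : String).toList = ['/'] by decide, pvSplitOn_eq]
    rw [hA, pvALoop_congr _ _ (pvSplitSeps_strip s.toList)]
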